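-- pv_equiv track=rewrite | github.com/H0NEYP0T-466/Dr.Document | backend/agents/section_writer.py | _trim_to_single_section
-- ===== SOURCE A (Python) =====
-- def _trim_to_single_section(content: str) -> str:
--     """
--     Ensure the content belongs to only ONE section.
--
--     The LLM is asked to write a single ``## Heading`` block, but it
--     sometimes appends additional ``##`` or ``#`` sections.  We keep
--     everything up to (but not including) the second top-level (H1/H2)
--     heading so that stray sections are stripped before the content is
--     used in the combined README.
--
--     Code fences (``` or ~~~) are tracked so that ``#`` characters inside
--     code blocks are never mistaken for Markdown headings.
--     """
--     lines = content.split('\n')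
--     result: list[str] = []
--     found_main = False
--     in_code_fence = False
--
--     for line in lines:
--         stripped = line.strip()
--
--         # Track code-fence boundaries (``` or ~~~).
--         # Only toggle when the rest of the line after the fence marker is
--         # empty or a simple language identifier (no spaces), so that a line
--         # like "```python # example" inside a code block is NOT treated as
--         # a fence boundary.
--         if stripped.startswith('```') or stripped.startswith('~~~'):
--             fence_char = stripped[0]
--             rest = stripped.lstrip(fence_char).strip()
--             if ' ' not in rest:
--                 in_code_fence = not in_code_fence
--
--         # Only treat a line as a heading when we are NOT inside a code fence
--         is_h1 = not in_code_fence and stripped.startswith('# ')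
--         is_h2 = not in_code_fence and stripped.startswith('## ')
--         is_top_heading = is_h1 or is_h2
--
--         if not found_main:
--             result.append(line)
--             if is_top_heading:
--                 found_main = True
--         else:
--             # Stop at the next H1/H2 — that belongs to a different section
--             if is_top_heading:
--                 break
--             result.append(line)
--
--     return '\n'.join(result).strip()
-- ===== SOURCE B (Python) =====
-- def _is_top(stripped):
--     return stripped.startswith('# ') or stripped.startswith('## ')
--
--
-- def _fence_step(stripped, fence):
--     if stripped.startswith('```') or stripped.startswith('~~~'):
--         rest = stripped.lstrip(stripped[0]).strip()
--         if ' ' not in rest: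
--             return not fence
--     return fence
--
--
-- def _head_flags(lines):
--     """For each line, whether it is a top-level (H1/H2) heading outside code fences."""
--     flags = []
--     fence = False
--     for line in lines:
--         stripped = line.strip()
--         fence = _fence_step(stripped, fence)
--         flags.append(not fence and _is_top(stripped))
--     return flags
--
--
-- def _trim_to_single_section(content: str) -> str:
--     lines = content.split('\n')
--     flags = _head_flags(lines)
--     heads = [i for i, f in enumerate(flags) if f]
--     cut = heads[1] if len(heads) >= 2 else len(lines)
--     return '\n'.join(lines[:cut]).strip()
-- ===== Notes on version B (the rewrite author's own statement) =====
-- stated objective: alternative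
-- what changed: Replaces A's stateful append-and-break accumulation (found_main flag, incremental result list) with a two-phase decomposition: one pass computes a per-line heading-flag list, then the cut point is the index of the second flagged line (or the end) and the result is a single slice lines[:cut].
import Mathlib
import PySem

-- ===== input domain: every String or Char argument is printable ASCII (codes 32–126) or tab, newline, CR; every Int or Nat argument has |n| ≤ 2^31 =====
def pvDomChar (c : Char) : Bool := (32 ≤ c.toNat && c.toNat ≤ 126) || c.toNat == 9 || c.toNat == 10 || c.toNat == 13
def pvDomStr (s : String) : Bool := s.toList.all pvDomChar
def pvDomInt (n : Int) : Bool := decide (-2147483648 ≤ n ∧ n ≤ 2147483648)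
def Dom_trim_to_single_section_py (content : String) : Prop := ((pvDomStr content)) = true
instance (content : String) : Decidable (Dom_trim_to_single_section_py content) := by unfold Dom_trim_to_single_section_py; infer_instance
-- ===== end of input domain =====

-- B trades A's append-and-break accumulation for a two-phase 'flag the headings, then slice at the second one' decomposition (objective: alternative).

-- ===== PORT A =====
-- A's loop with break: structural recursion over the lines, carrying found_main and in_code_fence.
def trimLoopA : List (List Char) → Bool → Bool → List (List Char)
  | [], _foundMain, _fence => []
  | line :: restLines, foundMain, fence =>
    let stripped := PySem.Chars.strip line
    let fence' :=
      if PySem.Chars.startswith stripped ['`', '`', '`'] || PySem.Chars.startswith stripped ['~', '~', '~'] then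
        -- fence_char = stripped[0] (nonempty under this branch);
        -- stripped.lstrip(fence_char) = dropWhile (· == fence_char): exact for a single strip char
        let fc := stripped.headD ' '
        let rest := PySem.Chars.strip (stripped.dropWhile (fun c => c == fc))
        if !(rest.contains ' ') then !fence else fence
      else fence
    let is_h1 := !fence' && PySem.Chars.startswith stripped ['#', ' ']
    let is_h2 := !fence' && PySem.Chars.startswith stripped ['#', '#', ' ']
    let isTop := is_h1 || is_h2
    if !foundMain then
      line :: trimLoopA restLines isTop fence'
    else if isTop then []
    else line :: trimLoopA restLines foundMain fence'

def trim_to_single_section_py (content : String) : String :=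
  let lines := PySem.Chars.splitOn content.toList ['\n']
  String.ofList (PySem.Chars.strip (PySem.Chars.join ['\n'] (trimLoopA lines false false)))

-- ===== PORT B =====
def isTopB (stripped : List Char) : Bool :=
  PySem.Chars.startswith stripped ['#', ' '] || PySem.Chars.startswith stripped ['#', '#', ' ']

def fenceStepB (stripped : List Char) (fence : Bool) : Bool :=
  if PySem.Chars.startswith stripped ['`', '`', '`'] || PySem.Chars.startswith stripped ['~', '~', '~'] then
    -- stripped[0] (nonempty under this branch); lstrip(fence_char) = dropWhile: exact
    let fc := stripped.headD ' '
    let rest := PySem.Chars.strip (stripped.dropWhile (fun c => c == fc))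
    if !(rest.contains ' ') then !fence else fence
  else fence

def headFlagsB : List (List Char) → Bool → List Bool
  | [], _fence => []
  | line :: restLines, fence =>
    let stripped := PySem.Chars.strip line
    let fence' := fenceStepB stripped fence
    (!fence' && isTopB stripped) :: headFlagsB restLines fence'

def trim_to_single_section_py_alt (content : String) : String :=
  let lines := PySem.Chars.splitOn content.toList ['\n']
  let flags := headFlagsB lines false
  let heads := ((PySem.List.enumerate flags).filter (fun p => p.2)).map (fun p => p.1)
  let cut : Int :=
    match heads with
    | _ :: c :: _ => c
    | _ => (lines.length : Int)
  String.ofList (PySem.Chars.strip (PySem.Chars.join ['\n'] (PySem.List.slice lines none (some cut))))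

-- ===== PRECONDITION & SPEC =====
def Spec_trim_to_single_section_py (content : String) (out : String) : Prop := out = trim_to_single_section_py_alt content
instance (content : String) (out : String) : Decidable (Spec_trim_to_single_section_py content out) := by unfold Spec_trim_to_single_section_py; infer_instance

-- ===== CLAIM (what is proved, stated in full; the proofs are below) =====
def Claim_equal_trim_to_single_section_py : Prop := ∀ (content : String), Dom_trim_to_single_section_py content → Spec_trim_to_single_section_py content (trim_to_single_section_py content)

-- ===== LEMMAS AND PROOFS =====

-- index of the first 'true' in a flag list (length if none)
def firstTrue : List Bool → Nat
  | [] => 0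
  | b :: r => if b then 0 else firstTrue r + 1

-- index of the second 'true' (length if fewer than two)
def secondTrue : List Bool → Nat
  | [] => 0
  | b :: r => (if b then firstTrue r else secondTrue r) + 1

-- indices of all 'true' flags, in order
def trueIdxs : List Bool → List Nat
  | [] => []
  | b :: r => (if b then [0] else []) ++ (trueIdxs r).map (· + 1)

def hd1 : List Nat → Nat → Nat
  | [], d => d
  | c :: _, _ => c

def hd2 : List Nat → Nat → Nat
  | _ :: c :: _, _ => c
  | _, d => d

theorem trimLoopA_found (lines : List (List Char)) (fence : Bool) :
    trimLoopA lines true fence = lines.take (firstTrue (headFlagsB lines fence)) := by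
  induction lines generalizing fence with
  | nil => simp [trimLoopA, headFlagsB, firstTrue]
  | cons line rest ih =>
    simp only [trimLoopA, headFlagsB, fenceStepB, isTopB, firstTrue,
      ← Bool.and_or_distrib_left]
    generalize (if PySem.Chars.startswith (PySem.Chars.strip line) ['`', '`', '`']
          || PySem.Chars.startswith (PySem.Chars.strip line) ['~', '~', '~'] then
        if !(PySem.Chars.strip ((PySem.Chars.strip line).dropWhile
              (fun c => c == (PySem.Chars.strip line).headD ' '))).contains ' '
        then !fence else fence
      else fence) = F
    cases hT : (!F && (PySem.Chars.startswith (PySem.Chars.strip line) ['#', ' ']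
        || PySem.Chars.startswith (PySem.Chars.strip line) ['#', '#', ' '])) <;>
      simp [ih]

theorem trimLoopA_main (lines : List (List Char)) (fence : Bool) :
    trimLoopA lines false fence = lines.take (secondTrue (headFlagsB lines fence)) := by
  induction lines generalizing fence with
  | nil => simp [trimLoopA, headFlagsB, secondTrue]
  | cons line rest ih =>
    simp only [trimLoopA, headFlagsB, fenceStepB, isTopB, secondTrue,
      ← Bool.and_or_distrib_left]
    generalize (if PySem.Chars.startswith (PySem.Chars.strip line) ['`', '`', '`']
          || PySem.Chars.startswith (PySem.Chars.strip line) ['~', '~', '~'] then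
        if !(PySem.Chars.strip ((PySem.Chars.strip line).dropWhile
              (fun c => c == (PySem.Chars.strip line).headD ' '))).contains ' '
        then !fence else fence
      else fence) = F
    cases hT : (!F && (PySem.Chars.startswith (PySem.Chars.strip line) ['#', ' ']
        || PySem.Chars.startswith (PySem.Chars.strip line) ['#', '#', ' '])) <;>
      simp [ih, trimLoopA_found]

theorem length_headFlagsB (lines : List (List Char)) (fence : Bool) :
    (headFlagsB lines fence).length = lines.length := by
  induction lines generalizing fence with
  | nil => rfl
  | cons line rest ih => simp [headFlagsB, ih]

theorem heads_eq (flags : List Bool) (s : Int) :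
    ((PySem.List.enumerate flags s).filter (fun p => p.2)).map (fun p => p.1)
      = (trueIdxs flags).map (fun k => s + (k : Nat)) := by
  induction flags generalizing s with
  | nil => simp [PySem.List.enumerate_nil, trueIdxs]
  | cons b r ih =>
    by_cases hb : b = true <;>
      simp [PySem.List.enumerate_cons, trueIdxs, hb, ih, Function.comp] <;>
      · intro a _
        ring

theorem hd1_trueIdxs (flags : List Bool) :
    hd1 (trueIdxs flags) flags.length = firstTrue flags := by
  induction flags with
  | nil => rfl
  | cons b r ih =>
    by_cases hb : b = true
    · simp [trueIdxs, hb, hd1, firstTrue]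
    · cases h : trueIdxs r with
      | nil => simp [trueIdxs, hb, hd1, firstTrue, ← ih, h]
      | cons c tl => simp [trueIdxs, hb, hd1, firstTrue, ← ih, h]

theorem hd2_trueIdxs (flags : List Bool) :
    hd2 (trueIdxs flags) flags.length = secondTrue flags := by
  induction flags with
  | nil => rfl
  | cons b r ih =>
    by_cases hb : b = true
    · have h1 := hd1_trueIdxs r
      cases h : trueIdxs r with
      | nil => simp [trueIdxs, hb, hd2, secondTrue, h, ← h1, hd1]
      | cons c tl => simp [trueIdxs, hb, hd2, secondTrue, h, ← h1, hd1]
    · cases h : trueIdxs r with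
      | nil => simp [trueIdxs, hb, hd2, secondTrue, ← ih, h]
      | cons c tl =>
        cases tl with
        | nil => simp [trueIdxs, hb, hd2, secondTrue, ← ih, h]
        | cons c2 tl2 => simp [trueIdxs, hb, hd2, secondTrue, ← ih, h]

theorem cut_match_eq (L : List Nat) (d : Nat) :
    (match L.map (fun k => ((k : Nat) : Int)) with
      | _ :: c :: _ => c
      | _ => (d : Int)) = (hd2 L d : Int) := by
  cases L with
  | nil => rfl
  | cons c tl =>
    cases tl with
    | nil => rfl
    | cons c2 tl2 => rfl

-- ===== VERDICT (by name: the statement is the Claim_ definition above) =====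
theorem trim_to_single_section_py_spec : Claim_equal_trim_to_single_section_py := by
  intro content _hdom
  unfold Spec_trim_to_single_section_py
  simp only [trim_to_single_section_py, trim_to_single_section_py_alt]
  generalize PySem.Chars.splitOn content.toList ['\n'] = l
  have hlen : (headFlagsB l false).length = l.length := length_headFlagsB l false
  rw [heads_eq (headFlagsB l false) 0]
  simp only [zero_add]
  rw [← hlen, cut_match_eq, hd2_trueIdxs]
  rw [PySem.List.slice_to _ (Int.natCast_nonneg _), Int.toNat_natCast]
  rw [trimLoopA_main]
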